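-- pv_equiv track=rewrite | github.com/samemon/retraction_effects_on_academic_careers | code/analysis/matching/10.filter_authors_and_multiple_aff.py | make_rank_ordinal
-- ===== SOURCE A (Python) =====
-- def make_rank_ordinal(rank):
--     rank_dict = {'101-150':125,
--                 '151-200':175,
--                 '201-300':250,
--                 '301-400':350,
--                 '401-500':450,
--                 '501-600':550,
--                 '601-700':650,
--                 '701-800':750,
--                 '801-900':850,
--                 '901-1000':950,
--                 '1001-':1500}
--
--     if rank in [str(rank) for rank in range(1,101)]:
--         return int(rank)
--     return rank_dict.get(rank)
-- ===== SOURCE B (Python) =====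
-- def make_rank_ordinal(rank):
--     # numeric ranks "1".."100" recognized by string shape instead of a 100-entry table:
--     # all digits, no leading zero, and at most two digits or exactly "100"
--     if rank.isdigit() and rank[0] != '0' and (len(rank) <= 2 or rank == '100'):
--         return int(rank)
--     if rank == '101-150': return 125
--     if rank == '151-200': return 175
--     if rank == '201-300': return 250
--     if rank == '301-400': return 350
--     if rank == '401-500': return 450
--     if rank == '501-600': return 550
--     if rank == '601-700': return 650
--     if rank == '701-800': return 750
--     if rank == '801-900': return 850
--     if rank == '901-1000': return 950
--     if rank == '1001-': return 1500
--     return None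
-- ===== Notes on version B (the rewrite author's own statement) =====
-- stated objective: alternative
-- what changed: Replaced A's per-call 100-string list membership test plus separate range dict with a table-free string-shape test (all digits, no leading zero, at most two digits or exactly '100') and a plain if-chain for the eleven range keys.
import Mathlib
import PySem

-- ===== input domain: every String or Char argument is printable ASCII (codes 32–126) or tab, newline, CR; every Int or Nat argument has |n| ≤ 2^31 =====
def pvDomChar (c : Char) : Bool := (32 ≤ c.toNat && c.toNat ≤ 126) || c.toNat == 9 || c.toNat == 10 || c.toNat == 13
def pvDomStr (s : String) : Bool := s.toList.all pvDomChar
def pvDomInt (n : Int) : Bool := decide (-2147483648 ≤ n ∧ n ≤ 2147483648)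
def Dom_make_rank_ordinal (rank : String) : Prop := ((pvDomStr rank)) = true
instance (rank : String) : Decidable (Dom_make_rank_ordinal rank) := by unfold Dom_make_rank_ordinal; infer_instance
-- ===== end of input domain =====

-- B replaces A's per-call 100-string membership list + dict with no table at all: a string-shape
-- test (all digits, no leading zero, ≤ 2 digits or exactly "100") and a plain if-chain (simpler).

-- ===== PORT A =====
-- the literal rank_dict A builds on every call
def pvRankDictA : PySem.Dict String Int :=
  PySem.Dict.ofList [("101-150", 125), ("151-200", 175), ("201-300", 250),
    ("301-400", 350), ("401-500", 450), ("501-600", 550), ("601-700", 650),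
    ("701-800", 750), ("801-900", 850), ("901-1000", 950), ("1001-", 1500)]

def make_rank_ordinal (rank : String) : Option Int :=
  if rank ∈ (PySem.List.pyRange 1 101 1).map PySem.Int.toStr then
    PySem.Int.ofStr? rank
  else pvRankDictA.get? rank

-- ===== PORT B =====
-- B's shape test `rank.isdigit() and rank[0] != '0' and (len(rank) <= 2 or rank == '100')`.
-- rank[0] is only reached when isdigit() holds (rank nonempty), so the Option comparison is exact.
def pvIsSmallRank (rank : String) : Bool :=
  PySem.Str.strIsdigit rank && !(PySem.Str.pyGet? rank 0 == some '0') &&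
    (decide (PySem.Str.len rank ≤ 2) || rank == "100")

def make_rank_ordinal_alt (rank : String) : Option Int :=
  if pvIsSmallRank rank then PySem.Int.ofStr? rank
  else if rank == "101-150" then some 125
  else if rank == "151-200" then some 175
  else if rank == "201-300" then some 250
  else if rank == "301-400" then some 350
  else if rank == "401-500" then some 450
  else if rank == "501-600" then some 550
  else if rank == "601-700" then some 650
  else if rank == "701-800" then some 750
  else if rank == "801-900" then some 850
  else if rank == "901-1000" then some 950
  else if rank == "1001-" then some 1500
  else none

-- ===== PRECONDITION & SPEC =====
def Spec_make_rank_ordinal (rank : String) (out : Option Int) : Prop := out = make_rank_ordinal_alt rank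
instance (rank : String) (out : Option Int) : Decidable (Spec_make_rank_ordinal rank out) := by unfold Spec_make_rank_ordinal; infer_instance

-- ===== CLAIM =====
def Claim_equal_make_rank_ordinal : Prop := ∀ (rank : String), Dom_make_rank_ordinal rank → Spec_make_rank_ordinal rank (make_rank_ordinal rank)

-- ===== LEMMAS AND PROOFS =====

-- the 100 numeric keys as an explicit literal list
def pvNumKeys : List String := ["1", "2", "3", "4", "5", "6", "7", "8", "9", "10", "11", "12", "13", "14", "15", "16", "17", "18", "19", "20", "21", "22", "23", "24", "25", "26", "27", "28", "29", "30", "31", "32", "33", "34", "35", "36", "37", "38", "39", "40", "41", "42", "43", "44", "45", "46", "47", "48", "49", "50", "51", "52", "53", "54", "55", "56", "57", "58", "59", "60", "61", "62", "63", "64", "65", "66", "67", "68", "69", "70", "71", "72", "73", "74", "75", "76", "77", "78", "79", "80", "81", "82", "83", "84", "85", "86", "87", "88", "89", "90", "91", "92", "93", "94", "95", "96", "97", "98", "99", "100"]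

set_option maxRecDepth 8192 in
lemma pvNumKeys_eq : (PySem.List.pyRange 1 101 1).map PySem.Int.toStr = pvNumKeys := by decide

lemma pvDigit_cases (c : Char) (h1 : '0' ≤ c) (h2 : c ≤ '9') :
    c ∈ ['0','1','2','3','4','5','6','7','8','9'] := by
  have h1' : 48 ≤ c.toNat := h1
  have h2' : c.toNat ≤ 57 := h2
  interval_cases h : c.toNat <;>
    (rw [show c = Char.ofNat c.toNat from (Char.ofNat_toNat c).symm, h]; decide)

-- B's shape test recognizes exactly the 100 numeric keys
lemma pvCond_iff (s : String) : pvIsSmallRank s = true ↔ s ∈ pvNumKeys := by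
  constructor
  · intro h
    unfold pvIsSmallRank at h
    simp only [Bool.and_eq_true, Bool.or_eq_true, Bool.not_eq_true', beq_iff_eq,
      decide_eq_true_eq, PySem.Str.strIsdigit, PySem.Chars.strIsdigit] at h
    obtain ⟨⟨⟨hne, hall⟩, hz⟩, hlen⟩ := h
    rcases hlen with hlen | h100
    · -- len(s) ≤ 2 : s is one or two digit chars, the first nonzero
      have hlen' : s.toList.length ≤ 2 := by
        have e : PySem.Str.len s = (s.toList.length : Int) := by simp [PySem.Str.len]
        rw [e] at hlen; exact_mod_cast hlen
      rw [← String.ofList_toList (s := s)]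
      rcases hcs : s.toList with _ | ⟨c, _ | ⟨d, _ | ⟨e, rest⟩⟩⟩
      · rw [hcs] at hne; simp at hne
      · rw [hcs] at hall
        simp only [List.all_cons, List.all_nil, Bool.and_true,
          PySem.Chars.isdigit, Bool.and_eq_true, decide_eq_true_eq] at hall
        have hz' : c ≠ '0' := by
          intro hc; subst hc
          simp [PySem.Str.pyGet?, PySem.Chars.pyGet?, PySem.List.pyGet?, PySem.List.pyIdx?, hcs] at hz
        have hmem := pvDigit_cases c hall.1 hall.2
        fin_cases hmem <;> first | (exact absurd rfl hz') | decide
      · rw [hcs] at hall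
        simp only [List.all_cons, List.all_nil, Bool.and_true,
          PySem.Chars.isdigit, Bool.and_eq_true, decide_eq_true_eq] at hall
        have hz' : c ≠ '0' := by
          intro hc; subst hc
          simp [PySem.Str.pyGet?, PySem.Chars.pyGet?, PySem.List.pyGet?, PySem.List.pyIdx?, hcs] at hz
        have hmc := pvDigit_cases c hall.1.1 hall.1.2
        have hmd := pvDigit_cases d hall.2.1 hall.2.2
        fin_cases hmc <;> first | (exact absurd rfl hz') | (fin_cases hmd <;> decide)
      · rw [hcs] at hlen'; simp at hlen'
    · subst h100; decide
  · intro h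
    fin_cases h <;> decide

-- the explicit items list behind A's rank_dict
lemma pvDictA_mk : pvRankDictA = PySem.Dict.mk [("101-150", 125), ("151-200", 175), ("201-300", 250),
    ("301-400", 350), ("401-500", 450), ("501-600", 550), ("601-700", 650),
    ("701-800", 750), ("801-900", 850), ("901-1000", 950), ("1001-", 1500)] := by decide

-- A's dict lookup equals B's if-chain
lemma pvElse_eq (r : String) :
    pvRankDictA.get? r =
      (if r == "101-150" then some 125
       else if r == "151-200" then some 175
       else if r == "201-300" then some 250
       else if r == "301-400" then some 350
       else if r == "401-500" then some 450
       else if r == "501-600" then some 550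
       else if r == "601-700" then some 650
       else if r == "701-800" then some 750
       else if r == "801-900" then some 850
       else if r == "901-1000" then some 950
       else if r == "1001-" then some 1500
       else none : Option Int) := by
  rw [pvDictA_mk]
  simp only [PySem.Dict.get?_mk_cons]
  simp only [BEq.comm]
  rfl

-- ===== VERDICT =====
theorem make_rank_ordinal_spec : Claim_equal_make_rank_ordinal := by
  intro rank _
  unfold Spec_make_rank_ordinal make_rank_ordinal make_rank_ordinal_alt
  by_cases h : rank ∈ (PySem.List.pyRange 1 101 1).map PySem.Int.toStr
  · have hc : pvIsSmallRank rank = true := (pvCond_iff rank).mpr (by rwa [pvNumKeys_eq] at h)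
    rw [if_pos h, if_pos hc]
  · have hc : pvIsSmallRank rank = false := by
      by_contra hb
      exact h (by rw [pvNumKeys_eq]; exact (pvCond_iff rank).mp (by simpa using hb))
    rw [if_neg h, hc, if_neg (by simp)]
    exact pvElse_eq rank
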